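-- pv_equiv track=rewrite | github.com/LEE-sh1673/Algorithm-Study | algorithm_basic_2/lecture_500/problems/boj_2085/main.py | left_check
-- ===== SOURCE A (Python) =====
-- def left_check(A: list, i: int, j: int) -> int:
--     n = len(A)
--     ans = 1
--
--     # visited with i-row
--     cnt = 1
--     for k in range(1, n):
--         if A[i][k] == A[i][k - 1]:
--             cnt += 1
--         else:
--             cnt = 1
--         ans = max(ans, cnt)
--
--     # visited with j-column
--     cnt = 1
--     for k in range(1, n):
--         if A[k][j] == A[k - 1][j]:
--             cnt += 1
--         else:
--             cnt = 1
--         ans = max(ans, cnt)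
--
--     # visited with (j+1)-column
--     if j + 1 < n:
--         cnt = 1
--         for k in range(1, n):
--             if A[k][j + 1] == A[k - 1][j + 1]:
--                 cnt += 1
--             else:
--                 cnt = 1
--             ans = max(ans, cnt)
--     return ans
-- ===== SOURCE B (Python) =====
-- def _longest_run(seq):
--     # longest run of equal consecutive elements, by grouping runs (skip-scan)
--     best = 0
--     k = 0
--     m = len(seq)
--     while k < m:
--         e = k
--         while e < m and seq[e] == seq[k]:
--             e += 1
--         if e - k > best:
--             best = e - k
--         k = e
--     return best
--
-- def left_check(A: list, i: int, j: int) -> int: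
--     n = len(A)
--     if n <= 1:
--         return 1
--     lines = [A[i][:n], [A[k][j] for k in range(n)]]
--     if j + 1 < n:
--         lines.append([A[k][j + 1] for k in range(n)])
--     return max(_longest_run(line) for line in lines)
-- ===== Notes on version B (the rewrite author's own statement) =====
-- stated objective: alternative
-- what changed: B extracts the row and the one or two columns as lists once and computes each one's longest run by a generic run-grouping skip-scan (jump from one run of equal elements to the next), replacing A's three inline reset-counter loops with a shared ans/cnt state.
import Mathlib
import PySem

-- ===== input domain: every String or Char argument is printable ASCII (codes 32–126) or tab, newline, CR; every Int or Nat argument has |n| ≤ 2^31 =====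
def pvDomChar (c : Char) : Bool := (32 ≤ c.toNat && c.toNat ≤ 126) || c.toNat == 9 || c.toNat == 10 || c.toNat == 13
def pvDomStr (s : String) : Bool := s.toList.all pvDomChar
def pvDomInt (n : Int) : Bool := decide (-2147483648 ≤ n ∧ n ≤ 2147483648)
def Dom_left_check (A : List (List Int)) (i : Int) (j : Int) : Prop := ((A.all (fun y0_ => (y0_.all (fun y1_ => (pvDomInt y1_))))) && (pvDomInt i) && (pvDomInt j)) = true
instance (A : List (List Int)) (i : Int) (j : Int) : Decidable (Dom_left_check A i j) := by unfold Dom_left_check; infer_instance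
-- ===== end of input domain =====

-- B replaces A's three reset-counter loops by generic run-grouping (skip-scan) over the three
-- extracted lines; same asymptotic cost, objective: alternative decomposition.

-- ===== PORT A =====
-- shared accessor for 'A[r][c]' (pyGet? = Python indexing; the .getD defaults are
-- never reached on inputs satisfying Pre_, where every access is in range)
def pvGet2 (A : List (List Int)) (r c : Int) : Int :=
  ((PySem.List.pyGet? ((PySem.List.pyGet? A r).getD []) c).getD 0)

-- one loop body of A: 'if line[k] == line[k-1]: cnt += 1 else cnt = 1; ans = max(ans, cnt)'
def pvStepA (f : Int → Int) (s : Int × Int) (k : Int) : Int × Int :=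
  let cnt := if f k = f (k - 1) then s.1 + 1 else 1
  (cnt, max s.2 cnt)

-- one 'for k in range(1, n)' loop of A, state (cnt, ans) starting at (1, a); returns ans
def pvLineA (f : Int → Int) (n : Int) (a : Int) : Int :=
  ((PySem.List.pyRange 1 n 1).foldl (pvStepA f) (1, a)).2

def left_check (A : List (List Int)) (i : Int) (j : Int) : Int :=
  let n : Int := A.length
  let ans1 := pvLineA (fun k => pvGet2 A i k) n 1
  let ans2 := pvLineA (fun k => pvGet2 A k j) n ans1
  if j + 1 < n then pvLineA (fun k => pvGet2 A k (j + 1)) n ans2 else ans2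

-- ===== PORT B =====
-- Source B's _longest_run: skip from one run of equal elements to the next
def pvLongestRun : List Int → Int
  | [] => 0
  | x :: xs =>
      max (1 + ((xs.takeWhile (· == x)).length : Int))
          (pvLongestRun (xs.dropWhile (· == x)))
termination_by l => l.length
decreasing_by
  simpa using Nat.lt_succ_of_le (List.length_dropWhile_le (· == x) xs)

-- Source B's 'A[i][:n]'
def pvRow (A : List (List Int)) (i n : Int) : List Int :=
  PySem.List.slice ((PySem.List.pyGet? A i).getD []) none (some n)

-- Source B's '[A[k][c] for k in range(n)]'
def pvCol (A : List (List Int)) (c n : Int) : List Int :=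
  (PySem.List.pyRange 0 n 1).map (fun k => pvGet2 A k c)

def left_check_alt (A : List (List Int)) (i : Int) (j : Int) : Int :=
  let n : Int := A.length
  if n ≤ 1 then 1
  else
    let lines :=
      if j + 1 < n then [pvRow A i n, pvCol A j n, pvCol A (j + 1) n]
      else [pvRow A i n, pvCol A j n]
    (PySem.List.max? (lines.map pvLongestRun) (fun v => v)).getD 0

-- ===== PRECONDITION & SPEC =====
-- Pre_ excludes exactly the inputs on which A raises IndexError (n ≤ 1 touches nothing):
-- for n ≥ 2 the row index i must be valid, that row must have at least n entries, and j
-- (and j+1 when j+1 < n) must be a valid Python index into every row.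
def Pre_left_check (A : List (List Int)) (i : Int) (j : Int) : Prop :=
  2 ≤ A.length →
    (PySem.Raise.InRange A.length i
     ∧ A.length ≤ ((PySem.List.pyGet? A i).getD []).length
     ∧ ∀ row ∈ A, PySem.Raise.InRange row.length j
         ∧ (j + 1 < (A.length : Int) → PySem.Raise.InRange row.length (j + 1)))
instance (A : List (List Int)) (i : Int) (j : Int) : Decidable (Pre_left_check A i j) := by
  unfold Pre_left_check; infer_instance

def pvWitness_left_check : List (List Int) × Int × Int := ([[1, 1], [2, 1]], 0, 0)

def Spec_left_check (A : List (List Int)) (i : Int) (j : Int) (out : Int) : Prop := out = left_check_alt A i j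
instance (A : List (List Int)) (i : Int) (j : Int) (out : Int) : Decidable (Spec_left_check A i j out) := by unfold Spec_left_check; infer_instance

-- ===== CLAIM (what is proved, stated in full; the proofs are below) =====
def Claim_equal_left_check : Prop := ∀ (A : List (List Int)) (i : Int) (j : Int), Dom_left_check A i j → Pre_left_check A i j → Spec_left_check A i j (left_check A i j)

-- ===== LEMMAS AND PROOFS =====

-- A's loop, rephrased on the elements: state (cnt, ans), prev tracked element-wise
def pvG (prev cnt ans : Int) : List Int → Int
  | [] => ans
  | y :: ys => pvG y (if y = prev then cnt + 1 else 1)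
                 (max ans (if y = prev then cnt + 1 else 1)) ys

-- longest run reachable from a pending run of 'cnt' copies of 'prev' followed by the list
def pvRunFrom (prev cnt : Int) : List Int → Int
  | [] => cnt
  | y :: ys => if y = prev then pvRunFrom y (cnt + 1) ys else max cnt (pvRunFrom y 1 ys)

-- index fold = element fold
lemma pvA1 (xs : List Int) : ∀ (f : Int → Int) (prev c a : Int) (off : Nat),
    f ↑off = prev → (∀ t : Nat, t < xs.length → f (↑off + 1 + ↑t) = xs.getD t 0) →
    ((PySem.List.pyRange (↑off + 1) (↑off + 1 + ↑xs.length) 1).foldl (pvStepA f) (c, a)).2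
      = pvG prev c a xs := by
  induction xs with
  | nil =>
      intro f prev c a off h0 hs
      rw [PySem.List.pyRange_one_eq_nil (by simp)]
      rfl
  | cons y ys ih =>
      intro f prev c a off h0 hs
      rw [PySem.List.pyRange_one_cons (by simp only [List.length_cons]; push_cast; omega)]
      have hy : f (↑off + 1) = y := by simpa using hs 0 (by simp)
      have hstep : pvStepA f (c, a) (↑off + 1)
          = (if y = prev then c + 1 else 1, max a (if y = prev then c + 1 else 1)) := by
        simp only [pvStepA, add_sub_cancel_right, h0, hy]
      rw [List.foldl_cons, hstep]
      have hrange : PySem.List.pyRange (↑off + 1 + 1) (↑off + 1 + ↑(y :: ys).length) 1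
          = PySem.List.pyRange (↑(off + 1) + 1) (↑(off + 1) + 1 + ↑ys.length) 1 := by
        congr 1 <;> (simp only [List.length_cons]; push_cast; omega)
      rw [hrange,
        ih f y _ _ (off + 1) (by push_cast at hy ⊢; exact hy)
          (fun t ht => by
            have := hs (t + 1) (by simpa using ht)
            push_cast at this ⊢
            rw [show (off : Int) + 1 + 1 + t = off + 1 + (t + 1) by ring]
            simpa using this)]
      rfl

lemma pvRunFrom_ge (xs : List Int) : ∀ prev cnt, cnt ≤ pvRunFrom prev cnt xs := by
  induction xs with
  | nil => intro prev cnt; simp [pvRunFrom]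
  | cons y ys ih =>
      intro prev cnt
      simp only [pvRunFrom]
      split
      · exact le_trans (by omega) (ih y (cnt + 1))
      · exact le_max_left _ _

lemma pvA2 (ys : List Int) : ∀ prev c a, 1 ≤ c → c ≤ a →
    pvG prev c a ys = max a (pvRunFrom prev c ys) := by
  induction ys with
  | nil => intro prev c a h1 h2; simp [pvG, pvRunFrom]; omega
  | cons y ys ih =>
      intro prev c a h1 h2
      simp only [pvG, pvRunFrom]
      by_cases h : y = prev
      · simp only [if_pos h]
        rw [ih y (c + 1) _ (by omega) (le_max_right _ _)]
        have hge := pvRunFrom_ge ys y (c + 1)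
        rw [max_assoc, max_eq_right hge]
      · simp only [if_neg h]
        rw [ih y 1 _ le_rfl (le_max_right a 1),
          max_eq_left (show (1 : Int) ≤ a by omega), ← max_assoc, max_eq_left h2]

lemma pvA4 (xs : List Int) : ∀ prev c, 1 ≤ c →
    pvRunFrom prev c xs
      = max (c + ((xs.takeWhile (· == prev)).length : Int))
            (pvLongestRun (xs.dropWhile (· == prev))) := by
  induction xs with
  | nil => intro prev c h; simp [pvRunFrom, pvLongestRun]; omega
  | cons y ys ih =>
      intro prev c h
      simp only [pvRunFrom]
      by_cases hy : y = prev
      · subst hy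
        rw [List.takeWhile_cons_of_pos (by simp), List.dropWhile_cons_of_pos (by simp)]
        rw [ih y (c + 1) (by omega)]
        simp only [List.length_cons]
        push_cast
        ring_nf
      · rw [if_neg hy, List.takeWhile_cons_of_neg (by simpa using hy),
            List.dropWhile_cons_of_neg (by simpa using hy)]
        rw [ih y 1 le_rfl]
        simp only [pvLongestRun]
        simp

lemma pvLongestRun_eq_runFrom (x : Int) (xs : List Int) :
    pvLongestRun (x :: xs) = pvRunFrom x 1 xs := by
  rw [pvA4 xs x 1 le_rfl]
  simp [pvLongestRun]

lemma pvLongestRun_pos (L : List Int) (h : L ≠ []) : 1 ≤ pvLongestRun L := by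
  match L with
  | x :: xs =>
      simp only [pvLongestRun]
      have : (0 : Int) ≤ ((xs.takeWhile (· == x)).length : Int) := by positivity
      omega

-- pvA1 with offset 0
lemma pvA1' (xs : List Int) (f : Int → Int) (x c a : Int)
    (h0 : f 0 = x) (hs : ∀ t : Nat, t < xs.length → f (1 + ↑t) = xs.getD t 0) :
    ((PySem.List.pyRange 1 (1 + ↑xs.length) 1).foldl (pvStepA f) (c, a)).2 = pvG x c a xs := by
  have := pvA1 xs f x c a 0 (by simpa using h0) (by simpa using hs)
  simpa using this

-- the central line lemma: one of A's loops computes max a (longest run of the line)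
lemma pv_line_eq' (L : List Int) (f : Int → Int) (a : Int) (hL : L ≠ [])
    (hf : ∀ k : Nat, k < L.length → f ↑k = L.getD k 0) (ha : 1 ≤ a) :
    pvLineA f (↑L.length) a = max a (pvLongestRun L) := by
  match L with
  | x :: xs =>
      unfold pvLineA
      have hcast : (((x :: xs).length : Nat) : Int) = 1 + ↑xs.length := by
        simp only [List.length_cons]; push_cast; ring
      rw [hcast,
        pvA1' xs f x 1 a (by simpa using hf 0 (by simp))
          (fun t ht => by
            have := hf (t + 1) (by simpa using ht)
            push_cast at this ⊢
            simpa [add_comm] using this),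
        pvA2 xs x 1 a le_rfl ha, pvLongestRun_eq_runFrom]

-- helper facts for the three lines
lemma pv_line_eq (L : List Int) (f : Int → Int) (a n : Int) (hL : L ≠ [])
    (hn : (L.length : Int) = n)
    (hf : ∀ k : Nat, k < L.length → f ↑k = L.getD k 0) (ha : 1 ≤ a) :
    pvLineA f n a = max a (pvLongestRun L) := by
  rw [← hn]; exact pv_line_eq' L f a hL hf ha

lemma pvRow_length (A : List (List Int)) (i : Int)
    (h : A.length ≤ ((PySem.List.pyGet? A i).getD []).length) :
    (pvRow A i ↑A.length).length = A.length := by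
  unfold pvRow
  rw [PySem.List.slice_to _ (by positivity)]
  simp [h]

lemma pvRow_getD (A : List (List Int)) (i : Int) (k : Nat) (hk : k < A.length) :
    pvGet2 A i ↑k = (pvRow A i ↑A.length).getD k 0 := by
  unfold pvRow pvGet2
  rw [PySem.List.slice_to _ (by positivity)]
  rw [PySem.List.pyGet?_natCast]
  simp [List.getD_eq_getElem?_getD, hk]

lemma pvCol_length (A : List (List Int)) (c : Int) :
    (pvCol A c ↑A.length).length = A.length := by
  unfold pvCol
  simp [PySem.List.length_pyRange_one]

lemma pvCol_getD (A : List (List Int)) (c : Int) (k : Nat) (hk : k < A.length) :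
    pvGet2 A ↑k c = (pvCol A c ↑A.length).getD k 0 := by
  unfold pvCol
  rw [← PySem.List.pyGetD_natCast,
    PySem.List.pyGetD_map_pyRange (fun t => pvGet2 A t c) A.length k 0 hk]

-- ===== VERDICT (by name: the statement is the Claim_ definition above) =====
lemma pv_main (A : List (List Int)) (i j : Int) (hpre : Pre_left_check A i j) :
    left_check A i j = left_check_alt A i j := by
  by_cases hn : (A.length : Int) ≤ 1
  · simp only [left_check, left_check_alt, pvLineA,
      PySem.List.pyRange_one_eq_nil hn, List.foldl_nil, if_pos hn]
    split <;> rfl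
  · have hn2 : 2 ≤ A.length := by omega
    obtain ⟨hi, hrowlen, hcols⟩ := hpre hn2
    have hApos : 0 < A.length := by omega
    -- the three lines
    have h1len := pvRow_length A i hrowlen
    have h2len := pvCol_length A j
    have h3len := pvCol_length A (j + 1)
    have h1ne : pvRow A i ↑A.length ≠ [] := by
      intro h; rw [h] at h1len; simp at h1len; omega
    have h2ne : pvCol A j ↑A.length ≠ [] := by
      intro h; rw [h] at h2len; simp at h2len; omega
    have h3ne : pvCol A (j + 1) ↑A.length ≠ [] := by
      intro h; rw [h] at h3len; simp at h3len; omega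
    have e1 : pvLineA (fun k => pvGet2 A i k) ↑A.length 1
        = max 1 (pvLongestRun (pvRow A i ↑A.length)) :=
      pv_line_eq _ _ _ _ h1ne (by rw [h1len])
        (fun k hk => pvRow_getD A i k (h1len ▸ hk)) le_rfl
    set r1 := pvLongestRun (pvRow A i ↑A.length) with hr1
    have hr1pos : 1 ≤ r1 := pvLongestRun_pos _ h1ne
    have e1' : pvLineA (fun k => pvGet2 A i k) ↑A.length 1 = r1 := by
      rw [e1, max_eq_right hr1pos]
    set r2 := pvLongestRun (pvCol A j ↑A.length) with hr2
    have e2 : pvLineA (fun k => pvGet2 A k j) ↑A.length r1 = max r1 r2 :=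
      pv_line_eq _ _ _ _ h2ne (by rw [h2len])
        (fun k hk => pvCol_getD A j k (h2len ▸ hk)) hr1pos
    set r3 := pvLongestRun (pvCol A (j + 1) ↑A.length) with hr3
    have e3 : pvLineA (fun k => pvGet2 A k (j + 1)) ↑A.length (max r1 r2) = max (max r1 r2) r3 :=
      pv_line_eq _ _ _ _ h3ne (by rw [h3len])
        (fun k hk => pvCol_getD A (j + 1) k (h3len ▸ hk)) (le_trans hr1pos (le_max_left _ _))
    simp only [left_check, left_check_alt, e1', e2, e3, if_neg hn]
    by_cases hj : j + 1 < (A.length : Int)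
    · rw [if_pos hj, if_pos hj]
      simp only [List.map_cons, List.map_nil, PySem.List.max?_id_cons, List.foldl_cons,
        List.foldl_nil, Option.getD_some]
      rw [hr1, hr2, hr3]
    · rw [if_neg hj, if_neg hj]
      simp only [List.map_cons, List.map_nil, PySem.List.max?_id_cons, List.foldl_cons,
        List.foldl_nil, Option.getD_some]
      rw [hr1, hr2]

-- ===== VERDICT (by name: the statement is the Claim_ definition above) =====
theorem left_check_spec : Claim_equal_left_check := by
  intro A i j _ hpre
  exact pv_main A i j hpre
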